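-- pv_equiv track=rewrite | github.com/namratapadmanabhan/15112termproject | aiPlayerCheck.py | determineFinalWord
-- ===== SOURCE A (Python) =====
-- def determineFinalWord(possibleWord, cell, filledCells, currBoard):
--     boardPositions = [cell]
--     currPos = cell
--     boardLength = 15
--     beginningBoard = 0
--     endBoard = 14
--     if possibleWord:
--         nextCell = currPos + 1
--         while ((currPos + 1 in filledCells) or (currPos + 1 in currBoard)) and (currPos % boardLength != endBoard):
--             currPos += 1
--             boardPositions.append(currPos)
--         currPos = cell
--         prevCell = currPos - 1
--         while (currPos - 1 in filledCells) and (currPos % boardLength != beginningBoard):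
--             currPos -= 1
--             boardPositions.insert(beginningBoard, currPos)
--     else:
--         nextRow = currPos + boardLength
--         while (currPos + boardLength in filledCells) or (currPos + boardLength in currBoard):
--             currPos += boardLength
--             boardPositions.append(currPos)
--         currPos = cell
--         prevRow = currPos - boardLength
--         while currPos - boardLength in filledCells:
--             currPos -= boardLength
--             boardPositions.insert(beginningBoard, currPos)
--     return boardPositions
-- ===== SOURCE B (Python) =====
-- def determineFinalWord(possibleWord, cell, filledCells, currBoard):
--     # Sort-then-merge: collect once the occupied cells that could belong to the word's
--     # line on each side of `cell`, sort them, and take the maximal consecutive prefix.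
--     step = 1 if possibleWord else 15
--     occupied = set(filledCells) | set(currBoard)
--     fwdCands = sorted(p for p in occupied
--                       if p > cell and (p - cell) % step == 0
--                       and (not possibleWord or p % 15 != 0))
--     bwdCands = sorted((p for p in set(filledCells)
--                        if p < cell and (cell - p) % step == 0
--                        and (not possibleWord or p % 15 != 14)),
--                       reverse=True)
--     fwd = []
--     expect = cell + step
--     for p in fwdCands:
--         if p != expect:
--             break
--         fwd.append(p)
--         expect += step
--     bwd = []
--     expect = cell - step
--     for p in bwdCands:
--         if p != expect:
--             break
--         bwd.append(p)
--         expect -= step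
--     return bwd[::-1] + [cell] + fwd
-- ===== Notes on version B (the rewrite author's own statement) =====
-- stated objective: alternative
-- what changed: B replaces A's two cell-by-cell while-walks (with repeated O(n) membership scans and front-inserts) by a sort-then-merge pass: it builds hash sets, filters once the occupied cells on the word's line on each side of `cell` (with A's asymmetric conditions: forward uses filledCells+currBoard and the %15 guard only horizontally, backward only filledCells), sorts each side, and takes the maximal consecutive prefix of each sorted candidate list.
import Mathlib
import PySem

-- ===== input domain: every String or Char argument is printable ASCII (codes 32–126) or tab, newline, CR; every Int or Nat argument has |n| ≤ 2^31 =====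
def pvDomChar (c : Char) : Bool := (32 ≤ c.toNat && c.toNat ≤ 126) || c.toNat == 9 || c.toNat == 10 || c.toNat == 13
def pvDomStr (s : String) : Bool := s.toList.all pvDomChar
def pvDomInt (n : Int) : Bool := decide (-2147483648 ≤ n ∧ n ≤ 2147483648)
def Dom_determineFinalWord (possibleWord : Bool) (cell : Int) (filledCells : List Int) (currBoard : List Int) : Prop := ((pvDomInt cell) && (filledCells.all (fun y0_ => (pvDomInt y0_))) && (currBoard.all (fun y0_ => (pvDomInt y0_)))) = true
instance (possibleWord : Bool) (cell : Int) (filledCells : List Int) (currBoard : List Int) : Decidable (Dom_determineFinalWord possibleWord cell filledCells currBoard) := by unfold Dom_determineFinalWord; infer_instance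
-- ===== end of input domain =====

-- B replaces A's two cell-by-cell while-walks by a sort-then-merge pass over the occupied
-- cells of the word's line (objective: alternative algorithm of similar cost).

-- ===== PORT A =====
-- A's forward while loop: condition `c` is checked on currPos; on success currPos += s and
-- the new position is APPENDED.  The fuel argument only makes the recursion total: each
-- successful step needs a fresh member of filledCells ∪ currBoard, so the loop runs at most
-- (filledCells.length + currBoard.length) times.
def pvLoopF (s : Int) (c : Int → Bool) : Nat → Int → List Int → List Int
  | 0, _, acc => acc
  | f + 1, pos, acc => if c pos then pvLoopF s c f (pos + s) (acc ++ [pos + s]) else acc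

-- A's backward while loop: on success currPos -= s and the new position is INSERTED at index 0.
def pvLoopB (s : Int) (c : Int → Bool) : Nat → Int → List Int → List Int
  | 0, _, acc => acc
  | f + 1, pos, acc => if c pos then pvLoopB s c f (pos - s) ((pos - s) :: acc) else acc

-- Python's `%` with the positive literal divisor 15 is Lean's `Int.emod` (`%`), used below.
def determineFinalWord (possibleWord : Bool) (cell : Int) (filledCells : List Int) (currBoard : List Int) : List Int :=
  -- boardPositions = [cell]; branch on possibleWord exactly as A does
  if possibleWord then
    let fwd := pvLoopF 1
      (fun pos => (filledCells.contains (pos + 1) || currBoard.contains (pos + 1)) && (pos % 15 != 14))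
      (filledCells.length + currBoard.length) cell [cell]
    pvLoopB 1
      (fun pos => filledCells.contains (pos - 1) && (pos % 15 != 0))
      filledCells.length cell fwd
  else
    let fwd := pvLoopF 15
      (fun pos => filledCells.contains (pos + 15) || currBoard.contains (pos + 15))
      (filledCells.length + currBoard.length) cell [cell]
    pvLoopB 15
      (fun pos => filledCells.contains (pos - 15))
      filledCells.length cell fwd

-- ===== PORT B =====
-- Source B's consecutive-prefix loop: `for p in cands: if p != expect: break; take p; expect += d`.
def pvTake (d : Int) : List Int → Int → List Int
  | [], _ => []
  | p :: rest, expect => if p == expect then p :: pvTake d rest (expect + d) else []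

-- Python's `%` with a positive divisor (the step 1/15 and the literal 15) is Lean's `%` on Int.
def determineFinalWord_alt (possibleWord : Bool) (cell : Int) (filledCells : List Int) (currBoard : List Int) : List Int :=
  let step : Int := if possibleWord then 1 else 15
  let occupied : PySem.Set Int := PySem.Set.union (PySem.Set.ofList filledCells) currBoard
  let fwdCands := PySem.List.sorted
    (occupied.filter (fun p => decide (cell < p) && ((p - cell) % step == 0) && (!possibleWord || (p % 15 != 0))))
    (fun x => x) false
  let bwdCands := PySem.List.sorted
    ((PySem.Set.ofList filledCells).filter (fun p => decide (p < cell) && ((cell - p) % step == 0) && (!possibleWord || (p % 15 != 14))))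
    (fun x => x) true
  let fwd := pvTake step fwdCands (cell + step)
  let bwd := pvTake (-step) bwdCands (cell - step)
  bwd.reverse ++ cell :: fwd

-- ===== PRECONDITION & SPEC =====
def Spec_determineFinalWord (possibleWord : Bool) (cell : Int) (filledCells : List Int) (currBoard : List Int) (out : List Int) : Prop := out = determineFinalWord_alt possibleWord cell filledCells currBoard
instance (possibleWord : Bool) (cell : Int) (filledCells : List Int) (currBoard : List Int) (out : List Int) : Decidable (Spec_determineFinalWord possibleWord cell filledCells currBoard out) := by unfold Spec_determineFinalWord; infer_instance

-- ===== CLAIM (what is proved, stated in full; the proofs are below) =====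
def Claim_equal_determineFinalWord : Prop := ∀ (possibleWord : Bool) (cell : Int) (filledCells : List Int) (currBoard : List Int), Dom_determineFinalWord possibleWord cell filledCells currBoard → Spec_determineFinalWord possibleWord cell filledCells currBoard (determineFinalWord possibleWord cell filledCells currBoard)

-- ===== LEMMAS AND PROOFS =====

-- number of steps A's walk takes (proof-only helper)
def pvWalkN (d : Int) (ok : Int → Bool) : Nat → Int → Nat
  | 0, _ => 0
  | f + 1, pos => if ok (pos + d) then pvWalkN d ok f (pos + d) + 1 else 0

lemma pvLoopF_eq (s : Int) (cA cB : Int → Bool) (h : ∀ p, cA p = cB (p + s)) :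
    ∀ (f : Nat) (pos : Int) (acc : List Int),
      pvLoopF s cA f pos acc
        = acc ++ (List.range (pvWalkN s cB f pos)).map (fun i : Nat => pos + s + s * (i : Int)) := by
  intro f
  induction f with
  | zero => intro pos acc; simp [pvLoopF, pvWalkN]
  | succ f ih =>
    intro pos acc
    by_cases hc : cA pos = true
    · have hb : cB (pos + s) = true := by rw [← h]; exact hc
      simp only [pvLoopF, pvWalkN, hc, hb, if_true, ih]
      rw [List.range_succ_eq_map, List.map_cons, List.map_map, List.append_assoc]
      congr 1
      simp only [List.singleton_append, Nat.cast_zero, mul_zero, add_zero, List.cons.injEq,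
        true_and]
      apply List.map_congr_left
      intro i _
      simp only [Function.comp_apply]
      push_cast
      ring
    · have hb : cB (pos + s) = false := by rw [← h]; simp at hc; simp [hc]
      simp [pvLoopF, pvWalkN, hc, hb]

lemma pvLoopB_eq (s : Int) (cA cB : Int → Bool) (h : ∀ p, cA p = cB (p - s)) :
    ∀ (f : Nat) (pos : Int) (acc : List Int),
      pvLoopB s cA f pos acc
        = (List.range (pvWalkN (-s) cB f pos)).map
            (fun i : Nat => pos - s * ((pvWalkN (-s) cB f pos : Nat) : Int) + s * (i : Int)) ++ acc := by
  intro f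
  induction f with
  | zero => intro pos acc; simp [pvLoopB, pvWalkN]
  | succ f ih =>
    intro pos acc
    have hsub : pos + -s = pos - s := by ring
    by_cases hc : cA pos = true
    · have hb : cB (pos - s) = true := by rw [← h]; exact hc
      simp only [pvLoopB, pvWalkN, hsub, hc, hb, if_true, ih]
      rw [List.range_succ, List.map_append, List.map_singleton, List.append_assoc,
        List.singleton_append]
      congr 1
      · apply List.map_congr_left
        intro i _
        push_cast
        ring
      · congr 1
        push_cast
        ring
    · have hb : cB (pos - s) = false := by rw [← h]; simp at hc; simp [hc]
      simp [pvLoopB, pvWalkN, hsub, hc, hb]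

-- every position the walk stepped onto satisfied the condition
lemma pvWalkN_steps (d : Int) (ok : Int → Bool) :
    ∀ (f : Nat) (pos : Int) (i : Nat), 1 ≤ i → i ≤ pvWalkN d ok f pos →
      ok (pos + d * (i : Int)) = true := by
  intro f
  induction f with
  | zero => intro pos i h1 h2; simp [pvWalkN] at h2; omega
  | succ f ih =>
    intro pos i h1 h2
    by_cases hc : ok (pos + d) = true
    · simp only [pvWalkN, hc, if_true] at h2
      rcases Nat.lt_or_ge i 2 with hi | hi
      · have : i = 1 := by omega
        subst this
        simpa using hc
      · have h' := ih (pos + d) (i - 1) (by omega) (by omega)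
        have hcast : ((i - 1 : Nat) : Int) = (i : Int) - 1 := by omega
        have heq : pos + d + d * ((i - 1 : Nat) : Int) = pos + d * (i : Int) := by
          rw [hcast]; ring
        rw [heq] at h'
        exact h'
    · simp [pvWalkN, hc] at h2; omega

lemma pvWalkN_le (d : Int) (ok : Int → Bool) : ∀ (f : Nat) (pos : Int), pvWalkN d ok f pos ≤ f := by
  intro f
  induction f with
  | zero => intro pos; simp [pvWalkN]
  | succ f ih =>
    intro pos
    by_cases hc : ok (pos + d) = true
    · simp only [pvWalkN, hc, if_true]
      exact Nat.succ_le_succ (ih (pos + d))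
    · simp [pvWalkN, hc]

lemma pvWalkN_stop (d : Int) (ok : Int → Bool) :
    ∀ (f : Nat) (pos : Int), pvWalkN d ok f pos < f →
      ok (pos + d * ((pvWalkN d ok f pos : Int) + 1)) = false := by
  intro f
  induction f with
  | zero => intro pos h; omega
  | succ f ih =>
    intro pos h
    by_cases hc : ok (pos + d) = true
    · simp only [pvWalkN, hc, if_true] at h ⊢
      have := ih (pos + d) (by omega)
      rw [← this]
      congr 1
      push_cast
      ring
    · simp only [pvWalkN, hc, if_false, Bool.false_eq_true] at h ⊢
      have : pos + d * ((0 : Int) + 1) = pos + d := by ring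
      rw [Nat.cast_zero, this]
      simpa using hc

-- with fuel = |carrier| the walk's stopping point really fails the condition (pigeonhole)
lemma pvWalkN_char (d : Int) (hd : d ≠ 0) (ok : Int → Bool) (ms : List Int)
    (hmem : ∀ p, ok p = true → p ∈ ms) (pos : Int) :
    (∀ i : Nat, i < pvWalkN d ok ms.length pos → ok (pos + d * ((i : Int) + 1)) = true) ∧
    ok (pos + d * ((pvWalkN d ok ms.length pos : Int) + 1)) = false := by
  set n := pvWalkN d ok ms.length pos with hn
  have hsteps : ∀ i : Nat, i < n → ok (pos + d * ((i : Int) + 1)) = true := by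
    intro i hi
    have h' := pvWalkN_steps d ok ms.length pos (i + 1) (by omega) (by omega)
    have hc : ((i + 1 : Nat) : Int) = (i : Int) + 1 := by push_cast; ring
    rwa [hc] at h'
  refine ⟨hsteps, ?_⟩
  by_cases h : n < ms.length
  · exact pvWalkN_stop d ok ms.length pos h
  · have hn' : n = ms.length := le_antisymm (pvWalkN_le d ok ms.length pos) (by omega)
    by_contra hok
    have hok' : ok (pos + d * ((n : Int) + 1)) = true := by
      cases hh : ok (pos + d * ((n : Int) + 1)) with
      | false => exact absurd hh hok
      | true => rfl
    have hinj : Function.Injective (fun i : Nat => pos + d * ((i : Int) + 1)) := by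
      intro a b hab
      simp only at hab
      have : (a : Int) + 1 = (b : Int) + 1 := mul_left_cancel₀ hd (by omega)
      omega
    have hnodup : ((List.range (n + 1)).map (fun i : Nat => pos + d * ((i : Int) + 1))).Nodup :=
      (List.nodup_range).map hinj
    have hsub : ∀ x ∈ (List.range (n + 1)).map (fun i : Nat => pos + d * ((i : Int) + 1)), x ∈ ms := by
      intro x hx
      rcases List.mem_map.mp hx with ⟨i, hi, rfl⟩
      have hi' : i < n + 1 := List.mem_range.mp hi
      by_cases hin : i < n
      · exact hmem _ (hsteps i hin)
      · have : i = n := by omega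
        subst this
        exact hmem _ hok'
    have h1 : ((List.range (n + 1)).map (fun i : Nat => pos + d * ((i : Int) + 1))).toFinset.card = n + 1 := by
      rw [List.toFinset_card_of_nodup hnodup]
      simp
    have h2 : ((List.range (n + 1)).map (fun i : Nat => pos + d * ((i : Int) + 1))).toFinset ⊆ ms.toFinset := by
      intro x hx
      exact List.mem_toFinset.mpr (hsub x (List.mem_toFinset.mp hx))
    have h3 := Finset.card_le_card h2
    have h4 : ms.toFinset.card ≤ ms.length := ms.toFinset_card_le
    omega

-- B's consecutive-prefix scan on a list whose elements are distinct positions e + d·k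
-- listed in increasing k order: it returns exactly the maximal run e, e+d, e+2d, …
lemma pvTake_spec (d : Int) (hd : d ≠ 0) :
    ∀ (l : List Int) (e : Int),
      (∀ p ∈ l, ∃ k : Nat, p = e + d * (k : Int)) →
      l.Pairwise (fun p q => ∀ kp kq : Nat, p = e + d * (kp : Int) → q = e + d * (kq : Int) → kp < kq) →
      ∃ m : Nat, pvTake d l e = (List.range m).map (fun i : Nat => e + d * (i : Int)) ∧
        (∀ i : Nat, i < m → e + d * (i : Int) ∈ l) ∧ e + d * (m : Int) ∉ l := by
  intro l
  induction l with
  | nil =>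
    intro e _ _
    exact ⟨0, by simp [pvTake], by simp, by simp⟩
  | cons p rest ih =>
    intro e hex hord
    have hexp : ∃ k : Nat, p = e + d * (k : Int) := hex p (by simp)
    have hrel : ∀ q ∈ rest, ∀ kp kq : Nat, p = e + d * (kp : Int) → q = e + d * (kq : Int) → kp < kq :=
      fun q hq => (List.pairwise_cons.mp hord).1 q hq
    by_cases hpe : p = e
    · subst hpe
      -- the head is the expected cell: take it and continue at e + d
      have hk1 : ∀ q ∈ rest, ∃ k : Nat, q = (p + d) + d * (k : Int) := by
        intro q hq
        rcases hex q (by simp [hq]) with ⟨kq, hkq⟩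
        have hkq1 : 1 ≤ kq := by
          have := hrel q hq 0 kq (by simp) hkq
          omega
        refine ⟨kq - 1, ?_⟩
        have : ((kq - 1 : Nat) : Int) = (kq : Int) - 1 := by omega
        rw [this, hkq]
        ring
      have hord' : rest.Pairwise (fun a b => ∀ kp kq : Nat, a = (p + d) + d * (kp : Int) → b = (p + d) + d * (kq : Int) → kp < kq) := by
        refine (List.pairwise_cons.mp hord).2.imp ?_
        intro a b hab kp kq ha hb
        have ha' : a = p + d * ((kp + 1 : Nat) : Int) := by push_cast; rw [ha]; ring
        have hb' : b = p + d * ((kq + 1 : Nat) : Int) := by push_cast; rw [hb]; ring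
        have := hab (kp + 1) (kq + 1) ha' hb'
        omega
      rcases ih (p + d) hk1 hord' with ⟨m', heq, hmem, hnm⟩
      refine ⟨m' + 1, ?_, ?_, ?_⟩
      · simp only [pvTake, beq_self_eq_true, if_true, heq]
        rw [List.range_succ_eq_map, List.map_cons, List.map_map]
        simp only [Nat.cast_zero, mul_zero, add_zero, List.cons.injEq, true_and]
        apply List.map_congr_left
        intro i _
        simp only [Function.comp_apply]
        push_cast
        ring
      · intro i hi
        cases i with
        | zero => simp
        | succ j =>
          have : p + d * ((j + 1 : Nat) : Int) = (p + d) + d * (j : Int) := by push_cast; ring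
          rw [this]
          exact List.mem_cons_of_mem _ (hmem j (by omega))
      · have hne : p + d * ((m' + 1 : Nat) : Int) ≠ p := by
          intro hcontra
          have : d * ((m' + 1 : Nat) : Int) = 0 := by omega
          rcases mul_eq_zero.mp this with h | h
          · exact hd h
          · have : ((m' + 1 : Nat) : Int) = 0 := h
            omega
        intro hmemc
        rcases List.mem_cons.mp hmemc with h | h
        · exact hne h
        · have : p + d * ((m' + 1 : Nat) : Int) = (p + d) + d * (m' : Int) := by push_cast; ring
          rw [this] at h
          exact hnm h
    · -- the head is not the expected cell: the run is empty
      have hbeq : (p == e) = false := by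
        simp [hpe]
      refine ⟨0, by simp [pvTake, hbeq], by simp, ?_⟩
      simp only [Nat.cast_zero, mul_zero, add_zero]
      intro hmemc
      rcases List.mem_cons.mp hmemc with h | h
      · exact hpe h.symm
      · rcases hexp with ⟨kp, hkp⟩
        rcases hex e (by simp [h]) with ⟨ke, hke⟩
        have hke0 : ke = 0 := by
          have : d * (ke : Int) = 0 := by omega
          rcases mul_eq_zero.mp this with h' | h'
          · exact absurd h' hd
          · omega
        have := hrel e h kp ke hkp hke
        omega

-- two maximal runs of the same predicate have the same length
lemma runLen_unique (Q : Nat → Prop) (n m : Nat)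
    (h1 : ∀ i < n, Q i) (h2 : ¬ Q n) (h3 : ∀ i < m, Q i) (h4 : ¬ Q m) : n = m := by
  rcases lt_trichotomy n m with h | h | h
  · exact absurd (h3 n h) h2
  · exact h
  · exact absurd (h1 m h) h4

lemma reverse_map_range (e d : Int) (n : Nat) :
    ((List.range n).map (fun i : Nat => e + d * (i : Int))).reverse
      = (List.range n).map (fun i : Nat => e + d * ((n : Int) - 1) - d * (i : Int)) := by
  apply List.ext_getElem
  · simp
  intro i h1 h2
  have hlen : i < n := by simpa using h2
  rw [List.getElem_reverse]
  simp only [List.getElem_map, List.getElem_range, List.length_map, List.length_range]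
  have hcast : ((n - 1 - i : Nat) : Int) = (n : Int) - 1 - (i : Int) := by omega
  rw [hcast]
  ring

-- boundary-guard reformulation: A guards on currPos, B on the candidate cell
lemma mod_shift_fwd (p : Int) : ((p % 15 : Int) != 14) = (((p + 1) % 15 : Int) != 0) := by
  rw [Bool.eq_iff_iff]
  simp only [bne_iff_ne, ne_eq]
  omega

lemma mod_shift_bwd (p : Int) : ((p % 15 : Int) != 0) = (((p - 1) % 15 : Int) != 14) := by
  rw [Bool.eq_iff_iff]
  simp only [bne_iff_ne, ne_eq]
  omega

-- the forward candidate list: sorted ascending filter of a duplicate-free source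
lemma fwd_master (s cell : Int) (hs : 0 < s) (src : List Int) (hnd : src.Nodup)
    (pred : Int → Bool) (hpred : ∀ p, pred p = true → cell < p ∧ (p - cell) % s = 0) :
    ∃ m : Nat,
      pvTake s (PySem.List.sorted (src.filter pred) (fun x => x) false) (cell + s)
        = (List.range m).map (fun i : Nat => (cell + s) + s * (i : Int)) ∧
      (∀ i : Nat, i < m → (cell + s * ((i : Int) + 1) ∈ src ∧ pred (cell + s * ((i : Int) + 1)) = true)) ∧
      ¬ (cell + s * ((m : Int) + 1) ∈ src ∧ pred (cell + s * ((m : Int) + 1)) = true) := by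
  have hmem_l : ∀ p : Int, p ∈ PySem.List.sorted (src.filter pred) (fun x => x) false ↔ p ∈ src ∧ pred p = true := by
    intro p
    rw [PySem.List.mem_sorted, List.mem_filter]
  have hnodupl : (PySem.List.sorted (src.filter pred) (fun x => x) false).Nodup :=
    ((PySem.List.sorted_perm (src.filter pred) (fun x => x) false).nodup_iff).mpr (hnd.filter pred)
  have hlt : (PySem.List.sorted (src.filter pred) (fun x => x) false).Pairwise (· < ·) := by
    have h1 := PySem.List.sorted_pairwise (src.filter pred) (fun x => x)
    exact (h1.and hnodupl).imp (fun h => lt_of_le_of_ne h.1 h.2)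
  have hex : ∀ p ∈ PySem.List.sorted (src.filter pred) (fun x => x) false,
      ∃ k : Nat, p = (cell + s) + s * (k : Int) := by
    intro p hp
    rcases (hmem_l p).mp hp with ⟨-, hpred'⟩
    rcases hpred p hpred' with ⟨hcp, hmod⟩
    rcases (PySem.Int.emod_eq_zero_iff_dvd _ _).mp hmod with ⟨j, hj⟩
    have hj1 : 1 ≤ j := by nlinarith
    refine ⟨(j - 1).toNat, ?_⟩
    have hc : (((j - 1).toNat : Nat) : Int) = j - 1 := Int.toNat_of_nonneg (by omega)
    rw [hc]
    have : (cell + s) + s * (j - 1) = cell + s * j := by ring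
    rw [this]
    omega
  have hord : (PySem.List.sorted (src.filter pred) (fun x => x) false).Pairwise
      (fun p q => ∀ kp kq : Nat, p = (cell + s) + s * (kp : Int) → q = (cell + s) + s * (kq : Int) → kp < kq) := by
    refine hlt.imp ?_
    intro a b hab kp kq ha hb
    rw [ha, hb] at hab
    have h1 : s * (kp : Int) < s * (kq : Int) := by linarith
    have h2 : (kp : Int) < (kq : Int) := lt_of_mul_lt_mul_left h1 (le_of_lt hs)
    omega
  rcases pvTake_spec s (ne_of_gt hs) _ (cell + s) hex hord with ⟨m, heq, hmem, hnm⟩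
  refine ⟨m, heq, ?_, ?_⟩
  · intro i hi
    have h' := hmem i hi
    have harith : (cell + s) + s * (i : Int) = cell + s * ((i : Int) + 1) := by ring
    rw [harith] at h'
    exact (hmem_l _).mp h'
  · intro hcontra
    apply hnm
    have harith : (cell + s) + s * (m : Int) = cell + s * ((m : Int) + 1) := by ring
    rw [harith]
    exact (hmem_l _).mpr hcontra

-- the backward candidate list: sorted descending filter of a duplicate-free source
lemma bwd_master (s cell : Int) (hs : 0 < s) (src : List Int) (hnd : src.Nodup)
    (pred : Int → Bool) (hpred : ∀ p, pred p = true → p < cell ∧ (cell - p) % s = 0) :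
    ∃ m : Nat,
      pvTake (-s) (PySem.List.sorted (src.filter pred) (fun x => x) true) (cell - s)
        = (List.range m).map (fun i : Nat => (cell - s) + (-s) * (i : Int)) ∧
      (∀ i : Nat, i < m → (cell + (-s) * ((i : Int) + 1) ∈ src ∧ pred (cell + (-s) * ((i : Int) + 1)) = true)) ∧
      ¬ (cell + (-s) * ((m : Int) + 1) ∈ src ∧ pred (cell + (-s) * ((m : Int) + 1)) = true) := by
  have hmem_l : ∀ p : Int, p ∈ PySem.List.sorted (src.filter pred) (fun x => x) true ↔ p ∈ src ∧ pred p = true := by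
    intro p
    rw [PySem.List.mem_sorted, List.mem_filter]
  have hnodupl : (PySem.List.sorted (src.filter pred) (fun x => x) true).Nodup :=
    ((PySem.List.sorted_perm (src.filter pred) (fun x => x) true).nodup_iff).mpr (hnd.filter pred)
  have hgt : (PySem.List.sorted (src.filter pred) (fun x => x) true).Pairwise (fun a b => b < a) := by
    have h1 := PySem.List.sorted_pairwise_rev (src.filter pred) (fun x => x)
    exact (h1.and hnodupl).imp (fun h => lt_of_le_of_ne h.1 (Ne.symm h.2))
  have hex : ∀ p ∈ PySem.List.sorted (src.filter pred) (fun x => x) true,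
      ∃ k : Nat, p = (cell - s) + (-s) * (k : Int) := by
    intro p hp
    rcases (hmem_l p).mp hp with ⟨-, hpred'⟩
    rcases hpred p hpred' with ⟨hcp, hmod⟩
    rcases (PySem.Int.emod_eq_zero_iff_dvd _ _).mp hmod with ⟨j, hj⟩
    have hj1 : 1 ≤ j := by nlinarith
    refine ⟨(j - 1).toNat, ?_⟩
    have hc : (((j - 1).toNat : Nat) : Int) = j - 1 := Int.toNat_of_nonneg (by omega)
    rw [hc]
    have : (cell - s) + (-s) * (j - 1) = cell - s * j := by ring
    rw [this]
    omega
  have hord : (PySem.List.sorted (src.filter pred) (fun x => x) true).Pairwise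
      (fun p q => ∀ kp kq : Nat, p = (cell - s) + (-s) * (kp : Int) → q = (cell - s) + (-s) * (kq : Int) → kp < kq) := by
    refine hgt.imp ?_
    intro a b hab kp kq ha hb
    rw [ha, hb] at hab
    have h1 : s * (kp : Int) < s * (kq : Int) := by linarith
    have h2 : (kp : Int) < (kq : Int) := lt_of_mul_lt_mul_left h1 (le_of_lt hs)
    omega
  rcases pvTake_spec (-s) (neg_ne_zero.mpr (ne_of_gt hs)) _ (cell - s) hex hord with ⟨m, heq, hmem, hnm⟩
  refine ⟨m, heq, ?_, ?_⟩
  · intro i hi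
    have h' := hmem i hi
    have harith : (cell - s) + (-s) * (i : Int) = cell + (-s) * ((i : Int) + 1) := by ring
    rw [harith] at h'
    exact (hmem_l _).mp h'
  · intro hcontra
    apply hnm
    have harith : (cell - s) + (-s) * (m : Int) = cell + (-s) * ((m : Int) + 1) := by ring
    rw [harith]
    exact (hmem_l _).mpr hcontra

-- one branch of A (the two while-walks) equals the same branch of B (sort-then-merge):
-- gF/gB are A's boundary guards on currPos, gF'/gB' B's equivalent guards on the candidate cell
lemma branch_eq (s cell : Int) (hs : 0 < s) (filled board : List Int)
    (gF gB gF' gB' : Int → Bool)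
    (hgF : ∀ p, gF p = gF' (p + s)) (hgB : ∀ p, gB p = gB' (p - s)) :
    pvLoopB s (fun pos => filled.contains (pos - s) && gB pos) filled.length cell
      (pvLoopF s (fun pos => (filled.contains (pos + s) || board.contains (pos + s)) && gF pos)
        (filled.length + board.length) cell [cell])
      = (pvTake (-s) (PySem.List.sorted
            ((PySem.Set.ofList filled).filter
              (fun p => decide (p < cell) && ((cell - p) % s == 0) && gB' p)) (fun x => x) true)
          (cell - s)).reverse
        ++ cell :: pvTake s (PySem.List.sorted
            ((PySem.Set.union (PySem.Set.ofList filled) board).filter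
              (fun p => decide (cell < p) && ((p - cell) % s == 0) && gF' p)) (fun x => x) false)
          (cell + s) := by
  rw [pvLoopF_eq s _ (fun p => (filled.contains p || board.contains p) && gF' p)
      (fun p => by simp only; rw [hgF]),
    pvLoopB_eq s _ (fun p => filled.contains p && gB' p)
      (fun p => by simp only; rw [hgB])]
  -- characterise A's two walk lengths (pigeonhole on the carrier lists)
  have hlenFB : (filled ++ board).length = filled.length + board.length := by simp
  have charF := pvWalkN_char s (ne_of_gt hs)
      (fun p => (filled.contains p || board.contains p) && gF' p) (filled ++ board)
      (fun p hp => by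
        simp only [Bool.and_eq_true, Bool.or_eq_true] at hp
        rcases hp.1 with h | h
        · exact List.mem_append.mpr (Or.inl (by simpa using h))
        · exact List.mem_append.mpr (Or.inr (by simpa using h))) cell
  rw [hlenFB] at charF
  have charB := pvWalkN_char (-s) (neg_ne_zero.mpr (ne_of_gt hs))
      (fun p => filled.contains p && gB' p) filled
      (fun p hp => by
        simp only [Bool.and_eq_true] at hp
        simpa using hp.1) cell
  -- characterise B's two prefix lengths
  rcases fwd_master s cell hs (PySem.Set.union (PySem.Set.ofList filled) board)
      (PySem.Set.nodup_union (PySem.Set.ofList filled) board (PySem.Set.nodup_ofList filled))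
      (fun p => decide (cell < p) && ((p - cell) % s == 0) && gF' p)
      (fun p hp => by
        simp only [Bool.and_eq_true, decide_eq_true_eq, beq_iff_eq] at hp
        exact ⟨hp.1.1, hp.1.2⟩) with ⟨mF, heqF, hmemF, hnmF⟩
  rcases bwd_master s cell hs (PySem.Set.ofList filled) (PySem.Set.nodup_ofList filled)
      (fun p => decide (p < cell) && ((cell - p) % s == 0) && gB' p)
      (fun p hp => by
        simp only [Bool.and_eq_true, decide_eq_true_eq, beq_iff_eq] at hp
        exact ⟨hp.1.1, hp.1.2⟩) with ⟨mB, heqB, hmemB, hnmB⟩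
  -- the two characterisations describe the same predicate, so the lengths agree
  have hiffF : ∀ i : Nat,
      ((cell + s * ((i : Int) + 1) ∈ PySem.Set.union (PySem.Set.ofList filled) board ∧
        (decide (cell < cell + s * ((i : Int) + 1)) && ((cell + s * ((i : Int) + 1) - cell) % s == 0)
          && gF' (cell + s * ((i : Int) + 1))) = true)
       ↔ ((filled.contains (cell + s * ((i : Int) + 1)) || board.contains (cell + s * ((i : Int) + 1)))
          && gF' (cell + s * ((i : Int) + 1))) = true) := by
    intro i
    have h0 : (0 : Int) ≤ (i : Int) := Int.natCast_nonneg i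
    have hcl : cell < cell + s * ((i : Int) + 1) := by nlinarith
    have harith : cell + s * ((i : Int) + 1) - cell = s * ((i : Int) + 1) := by ring
    simp [PySem.Set.mem_union, PySem.Set.mem_ofList, hcl, harith, Int.mul_emod_right,
      Bool.and_eq_true, Bool.or_eq_true]
  have hiffB : ∀ i : Nat,
      ((cell + (-s) * ((i : Int) + 1) ∈ PySem.Set.ofList filled ∧
        (decide (cell + (-s) * ((i : Int) + 1) < cell) && ((cell - (cell + (-s) * ((i : Int) + 1))) % s == 0)
          && gB' (cell + (-s) * ((i : Int) + 1))) = true)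
       ↔ (filled.contains (cell + (-s) * ((i : Int) + 1)) && gB' (cell + (-s) * ((i : Int) + 1))) = true) := by
    intro i
    have h0 : (0 : Int) ≤ (i : Int) := Int.natCast_nonneg i
    simp [PySem.Set.mem_ofList, Int.mul_emod_right, hs, Bool.and_eq_true]
  have hnF : pvWalkN s (fun p => (filled.contains p || board.contains p) && gF' p)
      (filled.length + board.length) cell = mF := by
    refine runLen_unique
      (fun i => ((filled.contains (cell + s * ((i : Int) + 1)) || board.contains (cell + s * ((i : Int) + 1)))
        && gF' (cell + s * ((i : Int) + 1))) = true) _ mF charF.1 ?_ ?_ ?_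
    · intro h
      rw [charF.2] at h
      exact absurd h (by decide)
    · exact fun i hi => (hiffF i).mp (hmemF i hi)
    · exact fun h => hnmF ((hiffF mF).mpr h)
  have hnB : pvWalkN (-s) (fun p => filled.contains p && gB' p) filled.length cell = mB := by
    refine runLen_unique
      (fun i => (filled.contains (cell + (-s) * ((i : Int) + 1)) && gB' (cell + (-s) * ((i : Int) + 1))) = true)
      _ mB charB.1 ?_ ?_ ?_
    · intro h
      rw [charB.2] at h
      exact absurd h (by decide)
    · exact fun i hi => (hiffB i).mp (hmemB i hi)
    · exact fun h => hnmB ((hiffB mB).mpr h)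
  rw [hnF, hnB, heqF, heqB, reverse_map_range]
  simp only [List.singleton_append]
  congr 1
  apply List.map_congr_left
  intro i _
  ring

-- ===== VERDICT (by name: the statement is the Claim_ definition above) =====
theorem determineFinalWord_spec : Claim_equal_determineFinalWord := by
  intro pw cell filled board _
  unfold Spec_determineFinalWord determineFinalWord determineFinalWord_alt
  cases pw with
  | true =>
    simp only [if_true, Bool.not_true, Bool.false_or]
    exact branch_eq 1 cell (by norm_num) filled board
      (fun pos => pos % 15 != 14) (fun pos => pos % 15 != 0)
      (fun p => p % 15 != 0) (fun p => p % 15 != 14)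
      (fun p => mod_shift_fwd p) (fun p => mod_shift_bwd p)
  | false =>
    simp only [Bool.false_eq_true, if_false, Bool.not_false, Bool.true_or]
    have h1 : (fun pos => filled.contains (pos + 15) || board.contains (pos + 15))
        = (fun pos => (filled.contains (pos + 15) || board.contains (pos + 15)) && (true : Bool)) := by
      funext p; simp
    have h2 : (fun pos => filled.contains (pos - 15))
        = (fun pos => filled.contains (pos - 15) && (true : Bool)) := by
      funext p; simp
    rw [h1, h2]
    have hb := branch_eq 15 cell (by norm_num) filled board
      (fun _ => true) (fun _ => true) (fun _ => true) (fun _ => true)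
      (fun p => rfl) (fun p => rfl)
    simpa using hb
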